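-- pv_equiv track=rewrite | github.com/lkonig203/Hahn-Project | likely_tree.py | replacenodes
-- ===== SOURCE A (Python) =====
-- def replacenodes(inTree, newordering):
--     currindex = 0
--     i = 0
--     letters = [item.split('_')[0] for item in newordering]
--     output = ""
--     while i < len(inTree):
--         if inTree[i].isalpha(): # if current index is a letter
--             if inTree[i] in letters:
--                 output = output + newordering[currindex]
--                 currindex = currindex + 1 # go to next item in newordering
--                 i = i + 3
--             else:
--                 output = output + inTree[i]
--                 i = i + 1
--         else:
--             output = output + inTree[i]
--             i = i + 1
--     return output
-- ===== SOURCE B (Python) =====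
-- def replacenodes(inTree, newordering):
--     letters = {item.split('_')[0] for item in newordering}
--     # pass 1: pick the greedy replacement sites (each shadows the next two chars)
--     starts = []
--     nxt = 0
--     for i, ch in enumerate(inTree):
--         if i >= nxt and ch.isalpha() and ch in letters:
--             starts.append(i)
--             nxt = i + 3
--     # pass 2: splice the untouched slices between sites with the new entries
--     parts = []
--     prev = 0
--     j = 0
--     for i in starts:
--         parts.append(inTree[prev:i])
--         parts.append(newordering[j])
--         j += 1
--         prev = i + 3
--     parts.append(inTree[prev:])
--     return "".join(parts)
-- ===== Notes on version B (the rewrite author's own statement) =====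
-- stated objective: faster
-- what changed: Instead of A's single index-jumping scan that appends to a string, B works in two staged passes: it first computes the list of greedy replacement sites (interval selection over enumerated positions), then assembles the result by splicing the untouched slices between sites with the newordering entries and joining once.
import Mathlib
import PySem

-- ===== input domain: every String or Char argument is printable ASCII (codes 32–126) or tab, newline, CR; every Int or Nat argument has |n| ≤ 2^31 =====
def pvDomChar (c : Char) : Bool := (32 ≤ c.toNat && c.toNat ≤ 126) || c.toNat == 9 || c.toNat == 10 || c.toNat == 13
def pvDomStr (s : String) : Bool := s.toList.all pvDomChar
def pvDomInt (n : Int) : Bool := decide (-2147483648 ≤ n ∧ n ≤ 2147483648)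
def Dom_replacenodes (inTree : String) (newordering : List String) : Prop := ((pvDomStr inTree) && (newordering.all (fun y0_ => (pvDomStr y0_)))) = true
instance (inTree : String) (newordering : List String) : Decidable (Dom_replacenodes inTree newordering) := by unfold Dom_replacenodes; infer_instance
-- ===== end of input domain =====

-- B replaces A's index-jumping append-per-character scan by two staged passes:
-- first the greedy replacement sites are collected from the enumerated string, then the
-- result is assembled by splicing the untouched slices between the sites with the
-- newordering entries and joining once (measured faster: no quadratic concatenation).


-- ===== PORT A =====
-- item.split('_')[0] (split never returns an empty list, so index 0 is safe)
def pvFirstPart (item : String) : List Char :=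
  PySem.List.pyGetD (PySem.Chars.splitOn item.toList ['_']) 0 []

-- the while loop of A: cursor = remaining characters, state = (currindex, output);
-- 'i = i + 3' = consume the head and drop the next two characters
def replacenodesGoA (ordering : List String) (letters : List (List Char)) :
    List Char → Nat → List Char → List Char
  | [], _, output => output
  | c :: rest, currindex, output =>
    if PySem.Chars.isalpha c then
      if [c] ∈ letters then
        replacenodesGoA ordering letters (rest.drop 2) (currindex + 1)
          (output ++ (PySem.List.pyGetD ordering currindex "").toList)
      else replacenodesGoA ordering letters rest currindex (output ++ [c])
    else replacenodesGoA ordering letters rest currindex (output ++ [c])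
  termination_by l _ _ => l.length
  decreasing_by all_goals simp [List.length_drop]

def replacenodes (inTree : String) (newordering : List String) : String :=
  let letters := newordering.map pvFirstPart
  String.ofList (replacenodesGoA newordering letters inTree.toList 0 [])

-- ===== PORT B =====
-- pass 1 of B, one step: state (starts, nxt), input an enumerate pair (i, ch)
def replacenodesGstep (lset : PySem.Set (List Char))
    (st : List Int × Int) (p : Int × Char) : List Int × Int :=
  if p.1 ≥ st.2 ∧ PySem.Chars.isalpha p.2 ∧ [p.2] ∈ lset then (st.1 ++ [p.1], p.1 + 3)
  else st

-- pass 2 of B, one step: state (parts, j, prev), input a site i;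
-- appends inTree[prev:i] and newordering[j] (list indexing, total form under Pre_)
def replacenodesAstep (cs : List Char) (ordering : List String)
    (st : List (List Char) × Nat × Int) (i : Int) : List (List Char) × Nat × Int :=
  match st with
  | (parts, j, prev) =>
    (parts ++ [PySem.List.slice cs (some prev) (some i),
               (PySem.List.pyGetD ordering j "").toList], j + 1, i + 3)

def replacenodes_alt (inTree : String) (newordering : List String) : String :=
  let lset : PySem.Set (List Char) := PySem.Set.ofList (newordering.map pvFirstPart)
  let cs := inTree.toList
  let starts := ((PySem.List.enumerate cs 0).foldl (replacenodesGstep lset) ([], 0)).1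
  let fin := starts.foldl (replacenodesAstep cs newordering) ([], 0, 0)
  String.ofList (PySem.Chars.join [] (fin.1 ++ [PySem.List.slice cs (some fin.2.2) none]))

-- ===== PRECONDITION & SPEC =====
-- the greedy replacement sites the tree demands: a position whose character is alphabetic
-- and occurs among the orderings' first parts, each site shadowing the next two characters
def pvMatchPosAux (letters : List (List Char)) : Int → Nat → List Char → List Int
  | _, _, [] => []
  | n, Nat.succ k, _ :: rest => pvMatchPosAux letters (n + 1) k rest
  | n, 0, c :: rest =>
    if PySem.Chars.isalpha c ∧ [c] ∈ letters then n :: pvMatchPosAux letters (n + 1) 2 rest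
    else pvMatchPosAux letters (n + 1) 0 rest

def pvMatchPos (letters : List (List Char)) (n : Int) (s : List Char) : List Int :=
  pvMatchPosAux letters n 0 s

-- Pre_ excludes exactly the inputs on which A raises IndexError: trees demanding more
-- greedy replacement sites than newordering supplies; B raises IndexError there too.
def Pre_replacenodes (inTree : String) (newordering : List String) : Prop :=
  (pvMatchPos (newordering.map pvFirstPart) 0 inTree.toList).length ≤ newordering.length
instance (inTree : String) (newordering : List String) : Decidable (Pre_replacenodes inTree newordering) := by unfold Pre_replacenodes; infer_instance
def pvWitness_replacenodes : String × List String := ("b_a", ["b_x"])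

def Spec_replacenodes (inTree : String) (newordering : List String) (out : String) : Prop := out = replacenodes_alt inTree newordering
instance (inTree : String) (newordering : List String) (out : String) : Decidable (Spec_replacenodes inTree newordering out) := by unfold Spec_replacenodes; infer_instance

-- ===== CLAIM (what is proved, stated in full; the proofs are below) =====
def Claim_equal_replacenodes : Prop := ∀ (inTree : String) (newordering : List String), Dom_replacenodes inTree newordering → Pre_replacenodes inTree newordering → Spec_replacenodes inTree newordering (replacenodes inTree newordering)

-- ===== LEMMAS AND PROOFS =====

-- ''.join(ps) flattens the pieces
theorem pvIntersperse_nil_flatten (ps : List (List Char)) :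
    (List.intersperse ([] : List Char) ps).flatten = ps.flatten := by
  induction ps with
  | nil => rfl
  | cons p ps ih =>
    cases ps with
    | nil => rfl
    | cons q qs =>
      rw [List.intersperse_cons₂]
      simp only [List.flatten_cons] at ih ⊢
      rw [ih]
      simp

theorem pvJoin_nil_flatten (ps : List (List Char)) :
    PySem.Chars.join [] ps = ps.flatten := by
  simp [PySem.Chars.join, List.intercalate, pvIntersperse_nil_flatten]

-- pvMatchPos unfolds on a cons like A's scan: a site consumes three characters
theorem pvMatchPos_cons (letters : List (List Char)) (n : Int) (c : Char) (rest : List Char) :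
    pvMatchPos letters n (c :: rest)
      = if PySem.Chars.isalpha c ∧ [c] ∈ letters then
          n :: pvMatchPos letters (n + 3) (rest.drop 2)
        else pvMatchPos letters (n + 1) rest := by
  by_cases h : PySem.Chars.isalpha c ∧ [c] ∈ letters
  · rw [if_pos h]
    show pvMatchPosAux letters n 0 (c :: rest) = _
    rw [pvMatchPosAux, if_pos h]
    show _ = n :: pvMatchPosAux letters (n + 3) 0 (rest.drop 2)
    congr 1
    cases rest with
    | nil => rfl
    | cons d rest2 =>
      cases rest2 with
      | nil => rfl
      | cons d2 rest3 =>
        show pvMatchPosAux letters (n + 1 + 1 + 1) 0 rest3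
          = pvMatchPosAux letters (n + 3) 0 rest3
        have h3 : n + 1 + 1 + 1 = n + 3 := by ring
        rw [h3]
  · rw [if_neg h]
    show pvMatchPosAux letters n 0 (c :: rest) = _
    rw [pvMatchPosAux, if_neg h]
    rfl

-- A's loop: the accumulator is a prefix
theorem pvGoA_acc (ordering : List String) (letters : List (List Char)) :
    ∀ (l : List Char) (curr : Nat) (out : List Char),
      replacenodesGoA ordering letters l curr out
        = out ++ replacenodesGoA ordering letters l curr [] := by
  have H : ∀ (n : Nat) (l : List Char), l.length ≤ n → ∀ (curr : Nat) (out : List Char),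
      replacenodesGoA ordering letters l curr out
        = out ++ replacenodesGoA ordering letters l curr [] := by
    intro n
    induction n with
    | zero =>
      intro l hl curr out
      have : l = [] := List.eq_nil_of_length_eq_zero (by omega)
      subst this; simp [replacenodesGoA]
    | succ n ih =>
      intro l hl curr out
      cases l with
      | nil => simp [replacenodesGoA]
      | cons c rest =>
        simp only [List.length_cons] at hl
        by_cases ha : PySem.Chars.isalpha c
        · by_cases hm : [c] ∈ letters
          · rw [replacenodesGoA, replacenodesGoA, if_pos ha, if_pos hm, if_pos ha, if_pos hm,
                ih (rest.drop 2) (by simp [List.length_drop]; omega),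
                ih (rest.drop 2) (by simp [List.length_drop]; omega) (curr + 1)
                  ([] ++ (PySem.List.pyGetD ordering curr "").toList)]
            simp
          · rw [replacenodesGoA, replacenodesGoA, if_pos ha, if_neg hm, if_pos ha, if_neg hm,
                ih rest (by omega), ih rest (by omega) curr ([] ++ [c])]
            simp
        · rw [replacenodesGoA, replacenodesGoA, if_neg ha, if_neg ha,
              ih rest (by omega), ih rest (by omega) curr ([] ++ [c])]
          simp
  exact fun l => H l.length l (le_refl _)

-- pass 1: a position strictly below the threshold never fires, whatever its character
theorem pvGskip (lset : PySem.Set (List Char)) (c : Char) (rest : List Char)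
    (n : Int) (acc : List Int) (e : Int) (h : n < e) :
    (PySem.List.enumerate (c :: rest) n).foldl (replacenodesGstep lset) (acc, e)
      = (PySem.List.enumerate rest (n + 1)).foldl (replacenodesGstep lset) (acc, e) := by
  rw [PySem.List.enumerate_cons, List.foldl_cons]
  have : replacenodesGstep lset (acc, e) (n, c) = (acc, e) := by
    simp [replacenodesGstep]; intro h'; omega
  rw [this]

-- pass 1 computes the greedy match positions
theorem pvGreedy (letters : List (List Char)) :
    ∀ (s : List Char) (n e : Int) (acc : List Int), e ≤ n →
      ((PySem.List.enumerate s n).foldl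
          (replacenodesGstep (PySem.Set.ofList letters)) (acc, e)).1
        = acc ++ pvMatchPos letters n s := by
  have H : ∀ (m : Nat) (s : List Char), s.length ≤ m → ∀ (n e : Int) (acc : List Int), e ≤ n →
      ((PySem.List.enumerate s n).foldl
          (replacenodesGstep (PySem.Set.ofList letters)) (acc, e)).1
        = acc ++ pvMatchPos letters n s := by
    intro m
    induction m with
    | zero =>
      intro s hs n e acc he
      have : s = [] := List.eq_nil_of_length_eq_zero (by omega)
      subst this; simp [PySem.List.enumerate_nil, pvMatchPos, pvMatchPosAux]
    | succ m ih =>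
      intro s hs n e acc he
      cases s with
      | nil => simp [PySem.List.enumerate_nil, pvMatchPos, pvMatchPosAux]
      | cons c rest =>
        simp only [List.length_cons] at hs
        by_cases hmk : PySem.Chars.isalpha c ∧ [c] ∈ letters
        · have hset : [c] ∈ PySem.Set.ofList letters := by
            simpa [PySem.Set.mem_ofList] using hmk.2
          have hstep : replacenodesGstep (PySem.Set.ofList letters) (acc, e) (n, c)
              = (acc ++ [n], n + 3) := by
            simp [replacenodesGstep, he, hmk.1, hset]
          rw [PySem.List.enumerate_cons, List.foldl_cons, hstep, pvMatchPos_cons, if_pos hmk]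
          cases rest with
          | nil => simp [PySem.List.enumerate_nil, pvMatchPos, pvMatchPosAux]
          | cons d rest2 =>
            rw [pvGskip _ _ _ _ _ _ (by omega)]
            cases rest2 with
            | nil => simp [PySem.List.enumerate_nil, pvMatchPos, pvMatchPosAux]
            | cons d2 rest3 =>
              rw [pvGskip _ _ _ _ _ _ (by omega),
                  ih rest3 (by simp at hs ⊢; omega) (n + 1 + 1 + 1) (n + 3) (acc ++ [n]) (by omega)]
              have h3 : n + 1 + 1 + 1 = n + 3 := by ring
              rw [h3]; simp
        · have hstep : replacenodesGstep (PySem.Set.ofList letters) (acc, e) (n, c)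
              = (acc, e) := by
            by_cases ha : PySem.Chars.isalpha c
            · have : [c] ∉ PySem.Set.ofList letters := by
                simp [PySem.Set.mem_ofList]; intro h'; exact hmk ⟨ha, h'⟩
              simp [replacenodesGstep, this]
            · simp [replacenodesGstep, ha]
          rw [PySem.List.enumerate_cons, List.foldl_cons, hstep, pvMatchPos_cons, if_neg hmk,
              ih rest (by omega) (n + 1) e acc (by omega)]
  exact fun s => H s.length s (le_refl _)

-- pass 2: splicing the slices between the greedy sites rebuilds A's scan output
theorem pvAssemble (cs : List Char) (ord : List String) (letters : List (List Char)) :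
    ∀ (s : List Char) (n prev : Nat) (parts : List (List Char)) (j : Nat),
      s = cs.drop n → prev ≤ n →
      0 ≤ ((pvMatchPos letters n s).foldl (replacenodesAstep cs ord) (parts, j, (prev : Int))).2.2
      ∧ ((pvMatchPos letters n s).foldl (replacenodesAstep cs ord) (parts, j, (prev : Int))).1.flatten
          ++ cs.drop ((pvMatchPos letters n s).foldl (replacenodesAstep cs ord) (parts, j, (prev : Int))).2.2.toNat
        = parts.flatten ++ (cs.drop prev).take (n - prev) ++ replacenodesGoA ord letters s j [] := by
  have H : ∀ (m : Nat) (s : List Char), s.length ≤ m →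
      ∀ (n prev : Nat) (parts : List (List Char)) (j : Nat), s = cs.drop n → prev ≤ n →
      0 ≤ ((pvMatchPos letters n s).foldl (replacenodesAstep cs ord) (parts, j, (prev : Int))).2.2
      ∧ ((pvMatchPos letters n s).foldl (replacenodesAstep cs ord) (parts, j, (prev : Int))).1.flatten
          ++ cs.drop ((pvMatchPos letters n s).foldl (replacenodesAstep cs ord) (parts, j, (prev : Int))).2.2.toNat
        = parts.flatten ++ (cs.drop prev).take (n - prev) ++ replacenodesGoA ord letters s j [] := by
    intro m
    induction m with
    | zero =>
      intro s hs n prev parts j hdrop hp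
      have : s = [] := List.eq_nil_of_length_eq_zero (by omega)
      subst this
      have hlen : cs.length ≤ n := by
        have := congrArg List.length hdrop
        simp at this; omega
      have htake : (cs.drop prev).take (n - prev) = cs.drop prev :=
        List.take_of_length_le (by simp; omega)
      simp [pvMatchPos, pvMatchPosAux, replacenodesGoA, htake]
    | succ m ih =>
      intro s hs n prev parts j hdrop hp
      cases s with
      | nil =>
        have hlen : cs.length ≤ n := by
          have := congrArg List.length hdrop
          simp at this; omega
        have htake : (cs.drop prev).take (n - prev) = cs.drop prev :=
          List.take_of_length_le (by simp; omega)
        simp [pvMatchPos, pvMatchPosAux, replacenodesGoA, htake]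
      | cons c rest =>
        simp only [List.length_cons] at hs
        have hcsn : cs[n]? = some c := by
          have : (cs.drop n)[0]? = some c := by rw [← hdrop]; rfl
          simpa using this
        by_cases hmk : PySem.Chars.isalpha c ∧ [c] ∈ letters
        · -- a replacement site at n
          have hdrop3 : rest.drop 2 = cs.drop (n + 3) := by
            have : cs.drop (n + 3) = (cs.drop n).drop 3 := by
              rw [List.drop_drop]
            rw [this, ← hdrop]
            rfl
          have hstep : replacenodesAstep cs ord (parts, j, (prev : Int)) ((n : Nat) : Int)
              = (parts ++ [PySem.List.slice cs (some (prev : Int)) (some (n : Int)),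
                  (PySem.List.pyGetD ord j "").toList], j + 1, ((n : Int) + 3)) := by
            rfl
          have hcast : ((n : Int) + 3) = (((n + 3 : Nat) : Int)) := by push_cast; ring
          rw [pvMatchPos_cons, if_pos hmk, List.foldl_cons, hstep, hcast]
          obtain ⟨h0, hrec⟩ := ih (rest.drop 2) (by simp [List.length_drop]; omega)
            (n + 3) (n + 3)
            (parts ++ [PySem.List.slice cs (some (prev : Int)) (some (n : Int)),
              (PySem.List.pyGetD ord j "").toList]) (j + 1) hdrop3 (le_refl _)
          refine ⟨h0, ?_⟩
          rw [hrec]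
          have hslice : PySem.List.slice cs (some (prev : Int)) (some (n : Int))
              = (cs.drop prev).take (n - prev) := PySem.List.slice_natCast cs prev n
          have hGoA : replacenodesGoA ord letters (c :: rest) j []
              = (PySem.List.pyGetD ord j "").toList
                  ++ replacenodesGoA ord letters (rest.drop 2) (j + 1) [] := by
            rw [replacenodesGoA, if_pos hmk.1, if_pos hmk.2, pvGoA_acc]
            simp
          rw [hGoA, hslice]
          simp
        · -- not a site: the character stays inside the slice
          have hdrop1 : rest = cs.drop (n + 1) := by
            have : cs.drop (n + 1) = (cs.drop n).drop 1 := by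
              rw [List.drop_drop]
            rw [this, ← hdrop]
            rfl
          rw [pvMatchPos_cons, if_neg hmk]
          have hcast : ((n : Int) + 1) = (((n + 1 : Nat) : Int)) := by push_cast; ring
          rw [hcast]
          obtain ⟨h0, hrec⟩ := ih rest (by omega) (n + 1) prev parts j hdrop1 (by omega)
          refine ⟨h0, ?_⟩
          rw [hrec]
          have hidx : (cs.drop prev)[n - prev]? = some c := by
            rw [List.getElem?_drop]
            have : prev + (n - prev) = n := by omega
            rw [this, hcsn]
          have htake : (cs.drop prev).take (n + 1 - prev)
              = (cs.drop prev).take (n - prev) ++ [c] := by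
            have h1 : n + 1 - prev = (n - prev) + 1 := by omega
            rw [h1, List.take_add_one, hidx]
            rfl
          have hGoA : replacenodesGoA ord letters (c :: rest) j []
              = c :: replacenodesGoA ord letters rest j [] := by
            by_cases ha : PySem.Chars.isalpha c
            · have hm : [c] ∉ letters := fun h => hmk ⟨ha, h⟩
              rw [replacenodesGoA, if_pos ha, if_neg hm, pvGoA_acc]
              simp
            · rw [replacenodesGoA, if_neg ha, pvGoA_acc]
              simp
          rw [hGoA, htake]
          simp
  exact fun s => H s.length s (le_refl _)

-- ===== VERDICT (by name: the statement is the Claim_ definition above) =====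
theorem replacenodes_spec : Claim_equal_replacenodes := by
  intro inTree newordering _ _
  show replacenodes inTree newordering = replacenodes_alt inTree newordering
  show String.ofList (replacenodesGoA newordering (newordering.map pvFirstPart) inTree.toList 0 [])
      = String.ofList (PySem.Chars.join []
          (((((PySem.List.enumerate inTree.toList 0).foldl
                (replacenodesGstep (PySem.Set.ofList (newordering.map pvFirstPart))) ([], 0)).1).foldl
              (replacenodesAstep inTree.toList newordering) ([], 0, 0)).1
            ++ [PySem.List.slice inTree.toList
                  (some ((((PySem.List.enumerate inTree.toList 0).foldl
                    (replacenodesGstep (PySem.Set.ofList (newordering.map pvFirstPart))) ([], 0)).1).foldl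
                    (replacenodesAstep inTree.toList newordering) ([], 0, 0)).2.2) none]))
  rw [pvGreedy (newordering.map pvFirstPart) inTree.toList 0 0 [] (le_refl _)]
  simp only [List.nil_append]
  have h0 : ((0 : Nat) : Int) = (0 : Int) := by norm_num
  obtain ⟨hpos, hmain⟩ := pvAssemble inTree.toList newordering (newordering.map pvFirstPart)
    inTree.toList 0 0 [] 0 (by simp) (le_refl _)
  rw [h0] at hpos hmain
  simp only [List.flatten_nil, List.nil_append, Nat.sub_self, List.take_zero, List.drop_zero] at hmain
  rw [pvJoin_nil_flatten, List.flatten_append, PySem.List.slice_from _ hpos]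
  simp only [List.flatten_cons, List.flatten_nil, List.append_nil]
  rw [hmain]
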